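-- pv_equiv track=rewrite | github.com/ChrisMzz/compute-nematic-field | source/nematicfield.py | loop_over_positions
-- ===== SOURCE A (Python) =====
-- def loop_over_positions(shape, k=0) -> list[tuple]:
--     """Provides list of all positions in an ndarray of given shape.
--
--     Args:
--         shape (tuple): shape of ndarray
--     """
--     if k == len(shape)-1:
--         temp_list = []
--         for j in range(shape[-1]):
--             temp = list(shape)
--             temp[-1] = j
--             temp_list.append(tuple(temp))
--         return temp_list
--     temp_list = []
--     for j in range(shape[k]):
--         temp = list(shape)
--         temp[k] = j
--         temp_list += loop_over_positions(tuple(temp), k+1)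
--     return temp_list
-- ===== SOURCE B (Python) =====
-- def loop_over_positions(shape, k=0) -> list[tuple]:
--     """Provides list of all positions in an ndarray of given shape (iterative)."""
--     acc = [(j,) for j in range(shape[k])]
--     for i in range(k + 1, len(shape)):
--         acc = [t + (j,) for t in acc for j in range(shape[i])]
--     return [tuple(shape[:k]) + t for t in acc]
-- ===== Notes on version B (the rewrite author's own statement) =====
-- stated objective: simpler
-- what changed: Replaces A's recursion over dimensions (which copies and mutates shape at every level) by a single iterative product: start from the index tuples of dimension k and extend left-to-right with each later dimension's range, then attach the shape[:k] prefix. Pre_ restricts the recursion-depth parameter k to its natural domain 0 <= k < len(shape): outside it A either raises IndexError (k >= len(shape), k < -len(shape), or empty shape) or, for negative k, returns accidental values produced by Python's negative-index wraparound of an internal counter.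
-- outside the precondition, e.g. on loop_over_positions((2,), -1): A returns [(0,)], B returns [(0, 0), (0, 1), (1, 0), (1, 1)]
import Mathlib
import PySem

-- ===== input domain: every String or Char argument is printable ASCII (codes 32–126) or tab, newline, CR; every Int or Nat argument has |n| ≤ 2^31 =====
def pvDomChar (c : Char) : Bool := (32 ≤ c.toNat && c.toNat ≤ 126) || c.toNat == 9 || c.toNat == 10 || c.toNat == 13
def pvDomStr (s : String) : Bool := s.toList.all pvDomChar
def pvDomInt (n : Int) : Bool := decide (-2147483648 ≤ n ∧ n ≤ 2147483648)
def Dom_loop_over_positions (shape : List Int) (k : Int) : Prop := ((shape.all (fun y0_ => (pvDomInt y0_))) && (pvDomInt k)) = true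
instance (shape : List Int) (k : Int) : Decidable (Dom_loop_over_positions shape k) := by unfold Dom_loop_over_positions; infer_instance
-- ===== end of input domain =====

-- B replaces A's dimension recursion by an iterative inner-to-outer product of index ranges (objective: simpler).


-- ===== PORT A =====
def loop_over_positions (shape : List Int) (k : Int) : List (List Int) :=
  if k = (shape.length : Int) - 1 then
    match PySem.List.pyGet? shape (-1) with
    | none => []           -- Python raises IndexError here (empty shape); outside Pre_
    | some last =>
      (PySem.List.pyRange 0 last 1).foldl
        (fun acc j => acc ++ [PySem.List.pySetD shape (-1) j]) []
  else
    match h : PySem.List.pyGet? shape k with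
    | none => []           -- Python raises IndexError here; outside Pre_
    | some sk =>
      (PySem.List.pyRange 0 sk 1).foldl
        (fun acc j => acc ++ loop_over_positions (PySem.List.pySetD shape k j) (k + 1)) []
termination_by ((shape.length : Int) - k).toNat
decreasing_by
  · have hin : ¬ PySem.List.pyGet? shape k = none := by simp [h]
    rw [PySem.List.pyGet?_eq_none_iff] at hin
    push Not at hin
    simp [PySem.Raise.InRange] at hin
    have hlen : (PySem.List.pySetD shape k j).length = shape.length :=
      PySem.List.length_pySetD shape k j
    rw [hlen]
    omega

-- ===== PORT B =====
def loop_over_positions_alt (shape : List Int) (k : Int) : List (List Int) :=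
  match PySem.List.pyGet? shape k with
  | none => []             -- Python raises IndexError here (k out of range / empty shape); outside Pre_
  | some dk =>
    let acc0 := (PySem.List.pyRange 0 dk 1).map (fun j => [j])
    let acc := (PySem.List.pyRange (k + 1) (shape.length : Int) 1).foldl
      (fun acc i =>
        acc.flatMap (fun t =>
          (PySem.List.pyRange 0 (PySem.List.pyGetD shape i 0) 1).map (fun j => t ++ [j]))) acc0
    let pre := PySem.List.slice shape none (some k)
    acc.map (fun t => pre ++ t)

-- ===== PRECONDITION & SPEC =====
-- Pre_ restricts the recursion-depth parameter k to its natural domain 0 ≤ k < len(shape): outside it A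
-- either raises IndexError (k ≥ len(shape), k < -len(shape), or empty shape) or, for negative k, returns
-- accidental values produced by Python's negative-index wraparound of an internal counter.
def Pre_loop_over_positions (shape : List Int) (k : Int) : Prop :=
  0 ≤ k ∧ k < (shape.length : Int)
instance (shape : List Int) (k : Int) : Decidable (Pre_loop_over_positions shape k) := by
  unfold Pre_loop_over_positions; infer_instance
def pvWitness_loop_over_positions : List Int × Int := ([2, 3], 0)

def Spec_loop_over_positions (shape : List Int) (k : Int) (out : List (List Int)) : Prop := out = loop_over_positions_alt shape k
instance (shape : List Int) (k : Int) (out : List (List Int)) : Decidable (Spec_loop_over_positions shape k out) := by unfold Spec_loop_over_positions; infer_instance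

-- ===== CLAIM (what is proved, stated in full; the proofs are below) =====
def Claim_equal_loop_over_positions : Prop := ∀ (shape : List Int) (k : Int), Dom_loop_over_positions shape k → Pre_loop_over_positions shape k → Spec_loop_over_positions shape k (loop_over_positions shape k)

-- ===== LEMMAS AND PROOFS =====

-- Reference product: all index tuples of the given dimension list, row-major.
def pvProd : List Int → List (List Int)
  | [] => [[]]
  | d :: ds => (PySem.List.pyRange 0 d 1).flatMap (fun j => (pvProd ds).map (fun t => j :: t))

lemma pySetD_neg_one (xs : List Int) (v : Int) (h : xs ≠ []) :
    PySem.List.pySetD xs (-1) v = xs.dropLast ++ [v] := by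
  have hl : 0 < xs.length := List.length_pos_iff.mpr h
  have hi : PySem.List.pyIdx? xs.length (-1) = some (xs.length - 1) := by
    simp [PySem.List.pyIdx?]; omega
  simp only [PySem.List.pySetD, PySem.List.pySet?, hi, Option.map_some, Option.getD_some]
  rw [List.set_eq_take_append_cons_drop, if_pos (by omega)]
  simp [List.dropLast_eq_take, List.drop_eq_nil_of_le (by omega : xs.length ≤ xs.length - 1 + 1)]

lemma set_take_succ (l : List Int) (kn : Nat) (j : Int) (h : kn < l.length) :
    (l.set kn j).take (kn + 1) = l.take kn ++ [j] := by
  rw [List.set_eq_take_append_cons_drop, if_pos h]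
  rw [List.take_append]
  simp [List.length_take, Nat.min_eq_left (le_of_lt h)]

lemma A_char : ∀ (n : Nat) (shape : List Int) (k : Int),
    shape.length - k.toNat = n → 0 ≤ k → k < (shape.length : Int) →
    loop_over_positions shape k
      = (pvProd (shape.drop k.toNat)).map (fun t => shape.take k.toNat ++ t) := by
  intro n
  induction n with
  | zero => intro shape k hn h0 hl; omega
  | succ m ih =>
    intro shape k hn h0 hl
    have hne : shape ≠ [] := by
      intro he; subst he; simp at hl; omega
    have hkn : k.toNat < shape.length := by omega
    by_cases hk : k = (shape.length : Int) - 1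
    · -- base level: k indexes the last dimension
      have hknl : k.toNat = shape.length - 1 := by omega
      rw [loop_over_positions, if_pos hk]
      rw [PySem.List.pyGet?_neg_one, List.getLast?_eq_some_getLast hne]
      dsimp only
      rw [PySem.List.foldl_append_singleton_eq_map]
      rw [hknl, List.drop_length_sub_one hne]
      have hprod : pvProd [shape.getLast hne]
          = (PySem.List.pyRange 0 (shape.getLast hne) 1).map (fun j => [j]) := by
        simp only [pvProd]
        exact Eq.symm List.map_eq_flatMap
      rw [hprod, List.map_map, List.nil_append]
      refine List.map_congr_left (fun j _ => ?_)
      simp only [Function.comp]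
      rw [pySetD_neg_one shape j hne, List.dropLast_eq_take]
    · -- recursive level
      have hklt : k < (shape.length : Int) - 1 := by omega
      have hstep : k.toNat + 1 < shape.length + 1 := by omega
      rw [loop_over_positions, if_neg hk]
      rw [PySem.List.pyGet?_eq_some_getElem shape h0 hl]
      dsimp only
      rw [← List.flatMap_eq_foldl]
      have hrec : ∀ j : Int,
          loop_over_positions (PySem.List.pySetD shape k j) (k + 1)
            = (pvProd (shape.drop (k.toNat + 1))).map
                (fun t => (shape.take k.toNat ++ [j]) ++ t) := by
        intro j
        have hset : PySem.List.pySetD shape k j = shape.set k.toNat j :=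
          PySem.List.pySetD_of_nonneg shape j h0
        have hlen : (shape.set k.toNat j).length = shape.length := by simp
        have h1 : (shape.set k.toNat j).length - (k + 1).toNat = m := by
          rw [hlen]; omega
        have h2 : (0 : Int) ≤ k + 1 := by omega
        have h3 : k + 1 < ((shape.set k.toNat j).length : Int) := by rw [hlen]; omega
        rw [hset, ih (shape.set k.toNat j) (k + 1) h1 h2 h3]
        have hto : (k + 1).toNat = k.toNat + 1 := by omega
        rw [hto]
        rw [List.drop_set_of_lt (by omega : k.toNat < k.toNat + 1)]
        rw [set_take_succ shape k.toNat j (by omega)]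
      simp only [hrec]
      rw [List.drop_eq_getElem_cons hkn]
      simp only [pvProd, List.map_flatMap, List.map_map]
      refine List.flatMap_congr (fun j _ => ?_)
      refine List.map_congr_left (fun t _ => ?_)
      simp [Function.comp, List.append_assoc]

lemma pvProd_singleton (d : Int) :
    pvProd [d] = (PySem.List.pyRange 0 d 1).map (fun j => [j]) := by
  simp only [pvProd]
  exact Eq.symm List.map_eq_flatMap

lemma pvProd_snoc (g : Int) : ∀ ds : List Int,
    (pvProd ds).flatMap (fun t => (PySem.List.pyRange 0 g 1).map (fun j => t ++ [j]))
      = pvProd (ds ++ [g]) := by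
  intro ds
  induction ds with
  | nil =>
    simp only [pvProd, List.nil_append, List.flatMap_cons, List.flatMap_nil,
      List.nil_append, List.append_nil, pvProd_singleton]
  | cons d ds ihd =>
    simp only [pvProd, List.cons_append, List.flatMap_assoc, List.flatMap_map,
      ← ihd, List.map_flatMap, List.map_map]
    refine List.flatMap_congr (fun j _ => ?_)
    refine List.flatMap_congr (fun t _ => ?_)
    simp [Function.comp]

lemma B_fold (shape : List Int) (k : Int) (h0 : 0 ≤ k) (hl : k < (shape.length : Int))
    (hkn : k.toNat < shape.length) :
    ∀ c : Nat, k.toNat + 1 + c ≤ shape.length →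
    (PySem.List.pyRange (k + 1) (k + 1 + (c : Int)) 1).foldl
        (fun acc i =>
          acc.flatMap (fun t =>
            (PySem.List.pyRange 0 (PySem.List.pyGetD shape i 0) 1).map (fun j => t ++ [j])))
        ((PySem.List.pyRange 0 shape[k.toNat] 1).map (fun j => [j]))
      = pvProd ((shape.take (k.toNat + 1 + c)).drop k.toNat) := by
  intro c
  induction c with
  | zero =>
    intro hc
    have hr : PySem.List.pyRange (k + 1) (k + 1 + ((0 : Nat) : Int)) 1 = [] := by
      simp [PySem.List.pyRange]
    rw [hr, List.foldl_nil]
    have hdt : (shape.take (k.toNat + 1 + 0)).drop k.toNat = [shape[k.toNat]] := by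
      rw [List.drop_take, List.drop_eq_getElem_cons hkn]
      simp [List.take_add_one]
    rw [hdt, pvProd_singleton]
    rfl
  | succ c ihc =>
    intro hc
    have hc' : k.toNat + 1 + c ≤ shape.length := by omega
    have hcast : k + 1 + ((c + 1 : Nat) : Int) = (k + 1 + (c : Int)) + 1 := by push_cast; ring
    rw [hcast, PySem.List.pyRange_one_succ_right (by omega), List.foldl_append, ihc hc',
      List.foldl_cons, List.foldl_nil]
    have hidx : (k + 1 + (c : Int)).toNat = k.toNat + 1 + c := by omega
    have hlt : k.toNat + 1 + c < shape.length := by omega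
    have hget : PySem.List.pyGetD shape (k + 1 + (c : Int)) 0 = shape[k.toNat + 1 + c] := by
      rw [PySem.List.pyGetD_of_nonneg shape 0 (by omega), hidx]
      exact List.getD_eq_getElem shape 0 hlt
    rw [hget, pvProd_snoc]
    congr 1
    have hsh : k.toNat + 1 + (c + 1) = (k.toNat + 1 + c) + 1 := by omega
    rw [hsh, List.take_add_one, List.getElem?_eq_getElem hlt]
    rw [List.drop_append_of_le_length (by simp; omega)]
    simp

lemma B_char : ∀ (shape : List Int) (k : Int),
    0 ≤ k → k < (shape.length : Int) →
    loop_over_positions_alt shape k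
      = (pvProd (shape.drop k.toNat)).map (fun t => shape.take k.toNat ++ t) := by
  intro shape k h0 hl
  have hkn : k.toNat < shape.length := by omega
  unfold loop_over_positions_alt
  rw [PySem.List.pyGet?_eq_some_getElem shape h0 hl]
  dsimp only
  have hcast : (shape.length : Int) = k + 1 + ((shape.length - k.toNat - 1 : Nat) : Int) := by
    omega
  rw [hcast, B_fold shape k h0 hl hkn (shape.length - k.toNat - 1) (by omega)]
  have htake : k.toNat + 1 + (shape.length - k.toNat - 1) = shape.length := by omega
  rw [htake, List.take_length]
  simp only [PySem.List.slice_to _ h0]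

-- ===== VERDICT (by name: the statement is the Claim_ definition above) =====
theorem loop_over_positions_spec : Claim_equal_loop_over_positions := by
  intro shape k _hdom hpre
  obtain ⟨hk0, hklen⟩ := hpre
  unfold Spec_loop_over_positions
  rw [A_char (shape.length - k.toNat) shape k rfl hk0 hklen, B_char shape k hk0 hklen]
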